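-- pv_equiv track=rewrite | github.com/rajivraghu/video-maker | server.py | _ordinal_to_words
-- ===== SOURCE A (Python) =====
-- _ONES = ['', 'one', 'two', 'three', 'four', 'five', 'six', 'seven', 'eight', 'nine',
--          'ten', 'eleven', 'twelve', 'thirteen', 'fourteen', 'fifteen', 'sixteen',
--          'seventeen', 'eighteen', 'nineteen']
--
-- _TENS = ['', '', 'twenty', 'thirty', 'forty', 'fifty', 'sixty', 'seventy', 'eighty', 'ninety']
--
-- def _int_to_words(n):
--     """Convert integer 0-99999 to English words."""
--     if n == 0:
--         return 'zero'
--     if n < 0: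
--         return 'negative ' + _int_to_words(-n)
--     if n < 20:
--         return _ONES[n]
--     if n < 100:
--         return _TENS[n // 10] + ((' ' + _ONES[n % 10]) if n % 10 else '')
--     if n < 1000:
--         return _ONES[n // 100] + ' hundred' + ((' ' + _int_to_words(n % 100)) if n % 100 else '')
--     if n < 100000:
--         return _int_to_words(n // 1000) + ' thousand' + ((' ' + _int_to_words(n % 1000)) if n % 1000 else '')
--     return str(n)
--
-- def _ordinal_to_words(n):
--     """Convert integer to ordinal words: 1->first, 2->second, 21->twenty first."""
--     if n <= 0:
--         return _int_to_words(n)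
--     # Special ordinals
--     special = {1: 'first', 2: 'second', 3: 'third', 5: 'fifth',
--                8: 'eighth', 9: 'ninth', 12: 'twelfth'}
--     if n in special:
--         return special[n]
--     if n < 20:
--         base = _ONES[n]
--         if base.endswith('e'):
--             return base[:-1] + 'th'
--         return base + 'th'
--     if n < 100 and n % 10 == 0:
--         base = _TENS[n // 10]
--         return base[:-1] + 'ieth'  # twenty -> twentieth
--     if n < 100:
--         return _TENS[n // 10] + ' ' + _ordinal_to_words(n % 10)
--     # For larger, just do cardinal + th
--     return _int_to_words(n) + 'th'
-- ===== SOURCE B (Python) =====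
-- _ONES = ['', 'one', 'two', 'three', 'four', 'five', 'six', 'seven', 'eight', 'nine',
--          'ten', 'eleven', 'twelve', 'thirteen', 'fourteen', 'fifteen', 'sixteen',
--          'seventeen', 'eighteen', 'nineteen']
--
-- _TENS = ['', '', 'twenty', 'thirty', 'forty', 'fifty', 'sixty', 'seventy', 'eighty', 'ninety']
--
-- def _int_to_words(n):
--     """Convert integer 0-99999 to English words."""
--     if n == 0:
--         return 'zero'
--     if n < 0:
--         return 'negative ' + _int_to_words(-n)
--     if n < 20:
--         return _ONES[n]
--     if n < 100:
--         return _TENS[n // 10] + ((' ' + _ONES[n % 10]) if n % 10 else '')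
--     if n < 1000:
--         return _ONES[n // 100] + ' hundred' + ((' ' + _int_to_words(n % 100)) if n % 100 else '')
--     if n < 100000:
--         return _int_to_words(n // 1000) + ' thousand' + ((' ' + _int_to_words(n % 1000)) if n % 1000 else '')
--     return str(n)
--
-- _SPECIAL_WORDS = {'one': 'first', 'two': 'second', 'three': 'third', 'five': 'fifth',
--                   'eight': 'eighth', 'nine': 'ninth', 'twelve': 'twelfth'}
--
-- def _ordinal_to_words(n):
--     """Build the cardinal once, then ordinalize its last word (1 <= n < 100)."""
--     if n <= 0:
--         return _int_to_words(n)
--     if n >= 100: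
--         return _int_to_words(n) + 'th'
--     words = _int_to_words(n).split(' ')
--     last = words[-1]
--     if last in _SPECIAL_WORDS:
--         words[-1] = _SPECIAL_WORDS[last]
--     elif last.endswith('y'):
--         words[-1] = last[:-1] + 'ieth'
--     else:
--         words[-1] = last + 'th'
--     return ' '.join(words)
-- ===== Notes on version B (the rewrite author's own statement) =====
-- stated objective: alternative
-- what changed: B computes the cardinal words once with _int_to_words and then ordinalizes the final word via a word-keyed special map / 'y'->'ieth' / '+th' rule, replacing A's magnitude-branching recursion with an int-keyed special map.
import Mathlib
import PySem

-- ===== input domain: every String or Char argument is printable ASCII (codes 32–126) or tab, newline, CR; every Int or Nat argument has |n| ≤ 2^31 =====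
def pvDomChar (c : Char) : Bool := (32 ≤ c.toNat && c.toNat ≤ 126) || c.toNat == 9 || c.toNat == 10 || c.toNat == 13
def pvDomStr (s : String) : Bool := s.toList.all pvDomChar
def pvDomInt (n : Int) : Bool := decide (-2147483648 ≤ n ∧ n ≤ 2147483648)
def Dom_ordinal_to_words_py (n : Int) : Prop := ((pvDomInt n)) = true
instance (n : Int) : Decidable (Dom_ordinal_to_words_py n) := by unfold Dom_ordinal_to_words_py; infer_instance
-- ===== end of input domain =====

-- B rebuilds the ordinal by computing the cardinal words once and ordinalizing the last word
-- (word-keyed special map) instead of A's magnitude-branching recursion with an int-keyed map;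
-- objective: idiomatic/alternative decomposition, not speed.

-- ===== PORT A =====
def pyONES : List String :=
  ["", "one", "two", "three", "four", "five", "six", "seven", "eight", "nine",
   "ten", "eleven", "twelve", "thirteen", "fourteen", "fifteen", "sixteen",
   "seventeen", "eighteen", "nineteen"]

def pyTENS : List String :=
  ["", "", "twenty", "thirty", "forty", "fifty", "sixty", "seventy", "eighty", "ninety"]

-- _int_to_words: shared module helper used by both A and B (exactly as in the Python module).
-- Fuel only makes the recursion structural (the call depth is at most 3, so fuel = |n| + 1 is
-- never exhausted); list indexing _ONES[n] / _TENS[n//10] is always in range on the branches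
-- that reach it, so pyGetD's default "" is unreachable.
def int_to_words_fuel : Nat → Int → String
  | 0, _ => ""
  | fuel + 1, n =>
    if n = 0 then "zero"
    else if n < 0 then "negative " ++ int_to_words_fuel fuel (-n)
    else if n < 20 then PySem.List.pyGetD pyONES n ""
    else if n < 100 then
      PySem.List.pyGetD pyTENS (PySem.Int.floordiv n 10) "" ++
        (if PySem.Int.mod n 10 ≠ 0 then " " ++ PySem.List.pyGetD pyONES (PySem.Int.mod n 10) "" else "")
    else if n < 1000 then
      PySem.List.pyGetD pyONES (PySem.Int.floordiv n 100) "" ++ " hundred" ++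
        (if PySem.Int.mod n 100 ≠ 0 then " " ++ int_to_words_fuel fuel (PySem.Int.mod n 100) else "")
    else if n < 100000 then
      int_to_words_fuel fuel (PySem.Int.floordiv n 1000) ++ " thousand" ++
        (if PySem.Int.mod n 1000 ≠ 0 then " " ++ int_to_words_fuel fuel (PySem.Int.mod n 1000) else "")
    else PySem.Int.toStr n

def int_to_words_py (n : Int) : String := int_to_words_fuel (n.natAbs + 1) n

def pySpecialInts : PySem.Dict Int String :=
  PySem.Dict.ofList [(1, "first"), (2, "second"), (3, "third"), (5, "fifth"),
                     (8, "eighth"), (9, "ninth"), (12, "twelfth")]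

-- port of _ordinal_to_words; 'n in special: return special[n]' becomes contains + get?
-- (the key is known present, so get?.getD's default "" is unreachable); fuel as above
-- (self-recursion happens once, on n % 10 < fuel).
def ordinal_to_words_fuel : Nat → Int → String
  | 0, _ => ""
  | fuel + 1, n =>
    if n ≤ 0 then int_to_words_py n
    else if pySpecialInts.contains n then (pySpecialInts.get? n).getD ""
    else if n < 20 then
      let base := PySem.List.pyGetD pyONES n ""
      if PySem.Str.endswith base "e" then PySem.Str.slice base none (some (-1)) ++ "th"
      else base ++ "th"
    else if n < 100 ∧ PySem.Int.mod n 10 = 0 then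
      let base := PySem.List.pyGetD pyTENS (PySem.Int.floordiv n 10) ""
      PySem.Str.slice base none (some (-1)) ++ "ieth"
    else if n < 100 then
      PySem.List.pyGetD pyTENS (PySem.Int.floordiv n 10) "" ++ " " ++
        ordinal_to_words_fuel fuel (PySem.Int.mod n 10)
    else int_to_words_py n ++ "th"

def ordinal_to_words_py (n : Int) : String := ordinal_to_words_fuel (n.natAbs + 1) n

-- ===== PORT B =====
def pySpecialWords : PySem.Dict String String :=
  PySem.Dict.ofList [("one", "first"), ("two", "second"), ("three", "third"), ("five", "fifth"),
                     ("eight", "eighth"), ("nine", "ninth"), ("twelve", "twelfth")]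

-- B's own copy of the _int_to_words module helper (B's Python carries the helper itself);
-- same fuel/indexing remarks as on the A side.
def int_to_words_alt_fuel : Nat → Int → String
  | 0, _ => ""
  | fuel + 1, n =>
    if n = 0 then "zero"
    else if n < 0 then "negative " ++ int_to_words_alt_fuel fuel (-n)
    else if n < 20 then PySem.List.pyGetD pyONES n ""
    else if n < 100 then
      PySem.List.pyGetD pyTENS (PySem.Int.floordiv n 10) "" ++
        (if PySem.Int.mod n 10 ≠ 0 then " " ++ PySem.List.pyGetD pyONES (PySem.Int.mod n 10) "" else "")
    else if n < 1000 then
      PySem.List.pyGetD pyONES (PySem.Int.floordiv n 100) "" ++ " hundred" ++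
        (if PySem.Int.mod n 100 ≠ 0 then " " ++ int_to_words_alt_fuel fuel (PySem.Int.mod n 100) else "")
    else if n < 100000 then
      int_to_words_alt_fuel fuel (PySem.Int.floordiv n 1000) ++ " thousand" ++
        (if PySem.Int.mod n 1000 ≠ 0 then " " ++ int_to_words_alt_fuel fuel (PySem.Int.mod n 1000) else "")
    else PySem.Int.toStr n

def int_to_words_alt (n : Int) : String := int_to_words_alt_fuel (n.natAbs + 1) n

-- B: cardinal once, then ordinalize the last word. split(' ') never returns none (sep ≠ "");
-- the cardinal of 1 ≤ n < 100 is a nonempty word list, so words[-1]'s default "" is unreachable.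
def ordinal_to_words_py_alt (n : Int) : String :=
  if n ≤ 0 then int_to_words_alt n
  else if 100 ≤ n then int_to_words_alt n ++ "th"
  else
    let words := (PySem.Str.split? (int_to_words_alt n) " ").getD []
    let last := (PySem.List.pyGet? words (-1)).getD ""
    let newLast :=
      match pySpecialWords.get? last with
      | some w => w
      | none =>
        if PySem.Str.endswith last "y" then PySem.Str.slice last none (some (-1)) ++ "ieth"
        else last ++ "th"
    PySem.Str.join " " (PySem.List.pySetD words (-1) newLast)

-- ===== PRECONDITION & SPEC =====
def Spec_ordinal_to_words_py (n : Int) (out : String) : Prop := out = ordinal_to_words_py_alt n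
instance (n : Int) (out : String) : Decidable (Spec_ordinal_to_words_py n out) := by unfold Spec_ordinal_to_words_py; infer_instance

-- ===== CLAIM (what is proved, stated in full; the proofs are below) =====
def Claim_equal_ordinal_to_words_py : Prop := ∀ (n : Int), Dom_ordinal_to_words_py n → Spec_ordinal_to_words_py n (ordinal_to_words_py n)

-- ===== LEMMAS AND PROOFS =====
theorem int_to_words_fuel_eq (fuel : Nat) : ∀ n, int_to_words_alt_fuel fuel n = int_to_words_fuel fuel n := by
  induction fuel with
  | zero => intro n; rfl
  | succ f ih => intro n; simp only [int_to_words_alt_fuel, int_to_words_fuel, ih]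

theorem int_to_words_eq (n : Int) : int_to_words_alt n = int_to_words_py n :=
  int_to_words_fuel_eq _ n

set_option maxHeartbeats 4000000 in
set_option maxRecDepth 100000 in
theorem eq_small : ∀ k ∈ List.range 99, ordinal_to_words_py ((k : Int) + 1) = ordinal_to_words_py_alt ((k : Int) + 1) := by
  decide

theorem eq_big (n : Int) (h : 100 ≤ n) : ordinal_to_words_py n = ordinal_to_words_py_alt n := by
  have hk : pySpecialInts.keys = [1, 2, 3, 5, 8, 9, 12] := by rfl
  have hc : pySpecialInts.contains n = false := by
    simp [PySem.Dict.contains_eq_decide_mem_keys, hk]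
    omega
  have hfuel : n.natAbs + 1 = (n.natAbs - 1) + 1 + 1 := by omega
  rw [ordinal_to_words_py, ordinal_to_words_py_alt, hfuel, ordinal_to_words_fuel]
  rw [if_neg (by omega : ¬ n ≤ 0), if_neg (by omega : ¬ n ≤ 0), if_pos h, hc]
  simp only [Bool.false_eq_true, if_false]
  rw [if_neg (by omega : ¬ n < 20),
      if_neg (fun hand => absurd hand.1 (by omega) : ¬ (n < 100 ∧ PySem.Int.mod n 10 = 0)),
      if_neg (by omega : ¬ n < 100), int_to_words_eq]

-- ===== VERDICT (by name: the statement is the Claim_ definition above) =====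
theorem ordinal_to_words_py_spec : Claim_equal_ordinal_to_words_py := by
  intro n _
  unfold Spec_ordinal_to_words_py
  by_cases h0 : n ≤ 0
  · rw [ordinal_to_words_py, ordinal_to_words_py_alt, ordinal_to_words_fuel, if_pos h0, if_pos h0, int_to_words_eq]
  · by_cases h100 : 100 ≤ n
    · exact eq_big n h100
    · have hk : n = ((n.toNat - 1 : Nat) : Int) + 1 := by omega
      rw [hk]
      exact eq_small (n.toNat - 1) (by simp [List.mem_range]; omega)
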